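-- pv_equiv track=rewrite | github.com/rishukumar15/SNS | Assignment2/BT18CSE060_EA_D_util.py | get_RRSM_set
-- ===== SOURCE A (Python) =====
-- def calculate_gcd(n,m):
--
--     if m == 0:
--         return n
--
--     return calculate_gcd(m,n%m)
--
-- def get_RRSM_set(m):
--
--     res = []
--     res.append(1)
--     for i in range(2,m):
--
--         g = calculate_gcd(i,m)
--         if g == 1:
--             res.append(i)
--
--     return res
-- ===== SOURCE B (Python) =====
-- def get_RRSM_set(m):
--     if m <= 2:
--         return [1]
--     marked = [False] * m
--     for d in range(2, m):
--         if m % d == 0: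
--             for j in range(d, m, d):
--                 marked[j] = True
--     return [1] + [i for i in range(2, m) if not marked[i]]
-- ===== Notes on version B (the rewrite author's own statement) =====
-- stated objective: faster
-- what changed: Replaces the per-element recursive-gcd test with a sieve: mark multiples of every divisor d of m (2 <= d < m) in a boolean table, then collect the unmarked residues.
import Mathlib
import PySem

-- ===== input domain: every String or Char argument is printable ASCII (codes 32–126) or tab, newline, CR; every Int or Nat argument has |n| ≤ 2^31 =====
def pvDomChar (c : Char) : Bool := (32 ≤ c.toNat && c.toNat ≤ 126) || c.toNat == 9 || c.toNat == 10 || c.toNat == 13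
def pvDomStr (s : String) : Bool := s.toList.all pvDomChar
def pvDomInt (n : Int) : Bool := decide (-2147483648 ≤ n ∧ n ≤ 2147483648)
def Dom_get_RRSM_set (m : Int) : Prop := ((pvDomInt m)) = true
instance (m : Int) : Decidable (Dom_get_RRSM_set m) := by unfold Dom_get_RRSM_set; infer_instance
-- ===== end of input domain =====

-- B replaces A's per-element recursive-gcd test with a divisor sieve (mark the multiples of each
-- divisor of m in a boolean table, then collect the unmarked residues); a timing run reports it faster.

-- ===== PORT A =====
-- termination helper for the Euclidean recursion (Python's % has |result| < |divisor| for divisor ≠ 0)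
theorem pv_mod_natAbs_lt (n m : Int) (h : ¬ m = 0) : (PySem.Int.mod n m).natAbs < m.natAbs := by
  rcases lt_or_gt_of_ne h with hm | hm
  · have h1 := PySem.Int.mod_neg_bounds (a := n) hm
    omega
  · have h1 := PySem.Int.mod_nonneg (a := n) hm
    have h2 := PySem.Int.mod_lt (a := n) hm
    omega

def calculate_gcd (n m : Int) : Int :=
  if h : m = 0 then n
  else calculate_gcd m (PySem.Int.mod n m)
termination_by m.natAbs
decreasing_by exact pv_mod_natAbs_lt n m h

def get_RRSM_set (m : Int) : List Int :=
  (PySem.List.pyRange 2 m 1).foldl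
    (fun res i => if calculate_gcd i m == 1 then res ++ [i] else res) [1]

-- ===== PORT B =====
def get_RRSM_set_alt (m : Int) : List Int :=
  if m ≤ 2 then [1]
  else
    -- every index assigned by 'marked[j] = True' satisfies 0 ≤ d ≤ j < m = len(marked): pySetD is exact here
    let marked := (PySem.List.pyRange 2 m 1).foldl
      (fun marked d =>
        if PySem.Int.mod m d == 0 then
          (PySem.List.pyRange d m d).foldl (fun mk j => PySem.List.pySetD mk j true) marked
        else marked)
      (List.replicate m.toNat false)
    [1] ++ (PySem.List.pyRange 2 m 1).filter (fun i => !(PySem.List.pyGetD marked i false))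

-- ===== PRECONDITION & SPEC =====
def Spec_get_RRSM_set (m : Int) (out : List Int) : Prop := out = get_RRSM_set_alt m
instance (m : Int) (out : List Int) : Decidable (Spec_get_RRSM_set m out) := by unfold Spec_get_RRSM_set; infer_instance

-- ===== CLAIM (what is proved, stated in full; the proofs are below) =====
def Claim_equal_get_RRSM_set : Prop := ∀ (m : Int), Dom_get_RRSM_set m → Spec_get_RRSM_set m (get_RRSM_set m)

-- ===== LEMMAS AND PROOFS =====

theorem calc_gcd_eq (k : Nat) : ∀ n m : Int, 0 ≤ n → 0 ≤ m → m.natAbs ≤ k →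
    calculate_gcd n m = (Int.gcd n m : Int) := by
  induction k with
  | zero =>
    intro n m hn hm hk
    have : m = 0 := by omega
    subst this
    rw [calculate_gcd]
    simp [Int.gcd, Int.natAbs_of_nonneg hn]
  | succ k ih =>
    intro n m hn hm hk
    rw [calculate_gcd]
    by_cases h : m = 0
    · simp only [h, dif_pos]
      simp [Int.gcd, Int.natAbs_of_nonneg hn]
    · simp only [h, dif_neg, not_false_iff]
      have hmpos : 0 < m := lt_of_le_of_ne hm (Ne.symm h)
      rw [PySem.Int.mod_eq_emod_of_pos hmpos]
      have hrec := ih m (n % m) hm (Int.emod_nonneg n h) (by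
        have := pv_mod_natAbs_lt n m h
        rw [PySem.Int.mod_eq_emod_of_pos hmpos] at this
        omega)
      rw [hrec]
      congr 1
      rw [Int.gcd_comm]
      conv_rhs => rw [show n = n % m + m * (n / m) from by rw [Int.emod_add_ediv]]
      exact (Int.gcd_add_mul_left_left m (n % m) (n / m)).symm

theorem length_foldl_set (js : List Int) (l : List Bool) :
    (js.foldl (fun mk j => PySem.List.pySetD mk j true) l).length = l.length := by
  induction js generalizing l with
  | nil => rfl
  | cons j t ih => rw [List.foldl_cons, ih, PySem.List.length_pySetD]

theorem getD_foldl_set (js : List Int) (l : List Bool) (i : Nat)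
    (hi : i < l.length) (hjs : ∀ j ∈ js, 0 ≤ j) :
    (js.foldl (fun mk j => PySem.List.pySetD mk j true) l).getD i false
      = (l.getD i false || js.any (fun j => j == (i : Int))) := by
  induction js generalizing l with
  | nil => simp
  | cons j t ih =>
    have hj : (0:Int) ≤ j := hjs j (List.mem_cons_self ..)
    rw [List.foldl_cons, ih _ (by rw [PySem.List.length_pySetD]; exact hi)
        (fun x hx => hjs x (List.mem_cons_of_mem _ hx))]
    rw [PySem.List.pySetD_of_nonneg (h := hj)]
    simp only [List.any_cons]
    by_cases hij : j = (i : Int)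
    · subst hij
      have h1 : ((i:Int)).toNat = i := Int.toNat_natCast i
      rw [h1]
      simp [List.getD_eq_getElem?_getD, List.getElem?_set_self, hi]
    · have hne : j.toNat ≠ i := by omega
      simp only [List.getD_eq_getElem?_getD, List.getElem?_set_ne hne]
      have : (j == (i:Int)) = false := by simpa using hij
      rw [this, Bool.false_or]

theorem getD_sieve (m : Int) (ds : List Int) (l : List Bool) (i : Nat)
    (hi : i < l.length) (hds : ∀ d ∈ ds, 0 < d) :
    (ds.foldl (fun mk d =>
        if PySem.Int.mod m d == 0 then
          (PySem.List.pyRange d m d).foldl (fun mk2 j => PySem.List.pySetD mk2 j true) mk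
        else mk) l).getD i false
    = (l.getD i false ||
        ds.any (fun d => PySem.Int.mod m d == 0 &&
          (PySem.List.pyRange d m d).any (fun j => j == (i : Int)))) := by
  induction ds generalizing l with
  | nil => simp
  | cons d t ih =>
    have hd : (0:Int) < d := hds d (List.mem_cons_self ..)
    have hjs : ∀ j ∈ PySem.List.pyRange d m d, 0 ≤ j := by
      intro j hjmem
      have := (PySem.List.mem_pyRange_iff_of_pos hd j).mp hjmem
      omega
    rw [List.foldl_cons, List.any_cons]
    by_cases hc : (PySem.Int.mod m d == 0) = true
    · rw [if_pos hc, ih _ (by rw [length_foldl_set]; exact hi)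
          (fun x hx => hds x (List.mem_cons_of_mem _ hx)),
        getD_foldl_set _ _ _ hi hjs, hc]
      simp [Bool.or_assoc]
    · rw [if_neg hc, ih _ hi (fun x hx => hds x (List.mem_cons_of_mem _ hx))]
      rw [Bool.eq_false_iff.mpr hc]
      simp

theorem coprime_iff (m i : Int) (hm : 2 < m) (h2 : 2 ≤ i) (him : i < m) :
    Int.gcd i m = 1 ↔ ¬ ∃ d : Int, 2 ≤ d ∧ d < m ∧ d ∣ m ∧ d ∣ i := by
  constructor
  · rintro hg ⟨d, hd2, hdm, hdvm, hdvi⟩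
    have : d ∣ (Int.gcd i m : Int) := Int.dvd_coe_gcd hdvi hdvm
    rw [hg] at this
    have := Int.le_of_dvd (by norm_num) this
    omega
  · intro h
    by_contra hg
    set g : Int := (Int.gcd i m : Int) with hgdef
    have hgi : g ∣ i := Int.gcd_dvd_left i m
    have hgm : g ∣ m := Int.gcd_dvd_right i m
    have hgpos : 0 < g := by
      have : Int.gcd i m ≠ 0 := by
        intro h0
        rw [Int.gcd_eq_zero_iff] at h0
        omega
      positivity
    have hg2 : 2 ≤ g := by
      rcases Int.lt_or_le g 2 with h' | h'
      · exfalso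
        have hg1 : g = 1 := by omega
        apply hg
        rw [hgdef] at hg1
        exact_mod_cast hg1
      · exact h'
    have hgle : g ≤ i := Int.le_of_dvd (by omega) hgi
    exact h ⟨g, hg2, by omega, hgm, hgi⟩

theorem any_iff (m i : Int) (h2 : 2 ≤ i) (him : i < m) :
    (((PySem.List.pyRange 2 m 1).any (fun d => PySem.Int.mod m d == 0 &&
        (PySem.List.pyRange d m d).any (fun j => j == i))) = true)
      ↔ ∃ d : Int, 2 ≤ d ∧ d < m ∧ d ∣ m ∧ d ∣ i := by
  rw [List.any_eq_true]
  constructor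
  · rintro ⟨d, hdmem, hcond⟩
    obtain ⟨hd2, hdm⟩ := (PySem.List.mem_pyRange_one).mp hdmem
    rw [Bool.and_eq_true] at hcond
    obtain ⟨hmod, hany⟩ := hcond
    have hdvm : d ∣ m := (PySem.Int.mod_eq_zero_iff_dvd m d).mp (by simpa using hmod)
    rw [List.any_eq_true] at hany
    obtain ⟨j, hjmem, hji⟩ := hany
    have hj : j = i := by simpa using hji
    subst hj
    obtain ⟨hdj, hjm, hdvd⟩ := (PySem.List.mem_pyRange_iff_of_pos (by omega) j).mp hjmem
    have hdvi : d ∣ j := by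
      have := dvd_add hdvd (dvd_refl d)
      simpa using this
    exact ⟨d, hd2, hdm, hdvm, hdvi⟩
  · rintro ⟨d, hd2, hdm, hdvm, hdvi⟩
    refine ⟨d, (PySem.List.mem_pyRange_one).mpr ⟨hd2, hdm⟩, ?_⟩
    rw [Bool.and_eq_true]
    refine ⟨by simpa using (PySem.Int.mod_eq_zero_iff_dvd m d).mpr hdvm, ?_⟩
    rw [List.any_eq_true]
    refine ⟨i, (PySem.List.mem_pyRange_iff_of_pos (by omega) i).mpr
      ⟨Int.le_of_dvd (by omega) hdvi, him, dvd_sub hdvi (dvd_refl d)⟩, by simp⟩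

theorem key_bool (m i : Int) (hm : 2 < m) (h2 : 2 ≤ i) (him : i < m) :
    (calculate_gcd i m == 1)
      = !((PySem.List.pyRange 2 m 1).any (fun d => PySem.Int.mod m d == 0 &&
          (PySem.List.pyRange d m d).any (fun j => j == i))) := by
  rw [calc_gcd_eq m.natAbs i m (by omega) (by omega) le_rfl]
  by_cases hg : Int.gcd i m = 1
  · have hE := (coprime_iff m i hm h2 him).mp hg
    have hA : ((PySem.List.pyRange 2 m 1).any (fun d => PySem.Int.mod m d == 0 &&
        (PySem.List.pyRange d m d).any (fun j => j == i))) = false :=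
      Bool.eq_false_iff.mpr (fun h => hE ((any_iff m i h2 him).mp h))
    rw [hA, hg]
    decide
  · have hE : ∃ d : Int, 2 ≤ d ∧ d < m ∧ d ∣ m ∧ d ∣ i := by
      by_contra hne
      exact hg ((coprime_iff m i hm h2 him).mpr hne)
    rw [(any_iff m i h2 him).mpr hE]
    have : ((Int.gcd i m : Int) == 1) = false := by
      rw [beq_eq_false_iff_ne]
      exact fun hh => hg (by exact_mod_cast hh)
    rw [this]
    decide

-- ===== VERDICT (by name: the statement is the Claim_ definition above) =====
theorem get_RRSM_set_spec : Claim_equal_get_RRSM_set := by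
  intro m _
  unfold Spec_get_RRSM_set get_RRSM_set get_RRSM_set_alt
  by_cases hm : m ≤ 2
  · rw [if_pos hm, PySem.List.pyRange_one_eq_nil (by omega)]
    rfl
  · rw [if_neg hm]
    push_neg at hm
    rw [PySem.List.foldl_append_if_eq_filter]
    show [1] ++ _ = _
    congr 1
    apply List.filter_congr
    intro i hi
    obtain ⟨h2, him⟩ := PySem.List.mem_pyRange_one.mp hi
    rw [key_bool m i hm h2 him]
    congr 1
    have hcast : i = ((i.toNat : Nat) : Int) := (Int.toNat_of_nonneg (by omega)).symm
    rw [hcast, PySem.List.pyGetD_natCast]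
    rw [getD_sieve m _ _ _ (by simp; omega)
      (fun d hd => by have := PySem.List.mem_pyRange_one.mp hd; omega)]
    simp [← hcast]
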